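-- pv_equiv track=rewrite | github.com/Andreluizfc/code-challenges | leetcode/General/Suspicious Activity/solution.py | find_suspicious_activities
-- ===== SOURCE A (Python) =====
-- def find_suspicious_activities(suspicious_activities, new_activities, k=2):
--     final_activities = []
--
--     while True:
--         new_suspicious = []
--         for new_activity in new_activities:
--             if is_suspicious(new_activity, suspicious_activities, k) and new_activity not in final_activities:
--                 new_suspicious.append(new_activity)
--
--         if not new_suspicious:
--             break
--
--         for activity in new_suspicious:
--             final_activities.append(activity)
--             suspicious_activities.append(activity)
--
--     return final_activities
--
-- def is_suspicious(new_activity, suspicious_activities, k):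
--     for suspicious_activity in suspicious_activities:
--         if count_matching_values(new_activity, suspicious_activity) >= k:
--             return True
--     return False
--
-- def count_matching_values(activity1, activity2):
--     count = 0
--     for a, b in zip(activity1, activity2):
--         if a == b:
--             count += 1
--     return count
-- ===== SOURCE B (Python) =====
-- def find_suspicious_activities(suspicious_activities, new_activities, k=2):
--     # Round-based BFS: each round compares candidates only against the
--     # activities added in the previous round (the frontier); a set of tuples
--     # replaces the linear membership scan, and the match test stops as soon
--     # as k matches are found (or provably cannot be reached).
--     # Note: unlike A, B does not append to the suspicious_activities argument
--     # in place; the equivalence is about the return value.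
--     final_activities = []
--     seen = set()
--     frontier = suspicious_activities
--     while frontier:
--         cand = [a for a in new_activities
--                 if tuple(a) not in seen and any(_matches(a, s, k) for s in frontier)]
--         final_activities += cand
--         seen.update(map(tuple, cand))
--         frontier = cand
--     return final_activities
--
-- def _matches(a, s, k):
--     # True iff at least k positions of a and s agree
--     if k <= 0:
--         return True
--     if k > min(len(a), len(s)):
--         return False
--     c = 0
--     for x, y in zip(a, s):
--         if x == y:
--             c += 1
--             if c >= k:
--                 return True
--     return False
-- ===== Notes on version B (the rewrite author's own statement) =====
-- stated objective: faster
-- what changed: Replaced A's fixpoint that rescans every candidate against the entire growing suspicious list with full match counts by a round-based BFS comparing candidates only against the previous round's newly-added activities, with a tuple set for the membership test and a match test that exits early (impossible when k exceeds the overlap length, done at the k-th match).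
import Mathlib
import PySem

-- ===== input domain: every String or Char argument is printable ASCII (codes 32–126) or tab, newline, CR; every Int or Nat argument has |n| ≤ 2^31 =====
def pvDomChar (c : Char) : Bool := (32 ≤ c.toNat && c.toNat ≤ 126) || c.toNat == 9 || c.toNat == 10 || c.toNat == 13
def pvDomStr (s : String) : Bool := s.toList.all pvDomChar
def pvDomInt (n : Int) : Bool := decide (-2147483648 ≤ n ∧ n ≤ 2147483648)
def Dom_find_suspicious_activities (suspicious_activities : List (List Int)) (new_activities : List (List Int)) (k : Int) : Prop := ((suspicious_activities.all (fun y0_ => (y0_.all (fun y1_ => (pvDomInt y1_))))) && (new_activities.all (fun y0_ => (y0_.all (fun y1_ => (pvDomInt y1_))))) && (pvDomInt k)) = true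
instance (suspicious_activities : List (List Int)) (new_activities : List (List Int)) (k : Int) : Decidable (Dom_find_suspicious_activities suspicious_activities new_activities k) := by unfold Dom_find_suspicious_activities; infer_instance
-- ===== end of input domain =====

-- B replaces A's fixpoint scan of the whole suspicious list by a round-based BFS
-- comparing candidates only against the previous round's additions (objective: faster).
-- A appends to its suspicious_activities argument in place; B does not — the
-- equivalence proved here is about the return value only.

-- termination helper, cited by the ports' decreasing_by
theorem pvCountP_lt {α : Type} (l : List α) (p q : α → Bool)
    (himp : ∀ a ∈ l, p a = true → q a = true) (x : α) (hx : x ∈ l)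
    (hq : q x = true) (hp : ¬ p x = true) : l.countP p < l.countP q := by
  induction l with
  | nil => cases hx
  | cons b l ih =>
    simp only [List.countP_cons]
    rcases List.mem_cons.mp hx with h | h
    · subst h
      have := List.countP_mono_left (l := l) (p := p) (q := q)
        (fun a ha => himp a (List.mem_cons_of_mem _ ha))
      simp [hp, hq]; omega
    · have := ih (fun a ha h' => himp a (List.mem_cons_of_mem _ ha) h') h
      by_cases hb : p b = true
      · simp [hb, himp b (List.mem_cons_self) hb]; omega
      · simp [hb]; split <;> omega

-- ===== PORT A =====
def pvCountMatching (a b : List Int) : Int :=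
  (a.zip b).foldl (fun c p => if p.1 = p.2 then c + 1 else c) 0

def pvIsSuspicious (a : List Int) (S : List (List Int)) (k : Int) : Bool :=
  S.any (fun s => k ≤ pvCountMatching a s)

def pvCandA (new S F : List (List Int)) (k : Int) : List (List Int) :=
  new.filter (fun a => pvIsSuspicious a S k && !F.contains a)

def pvLoopA (new : List (List Int)) (k : Int) (S F : List (List Int)) : List (List Int) :=
  if h : pvCandA new S F k = [] then F
  else pvLoopA new k (S ++ pvCandA new S F k) (F ++ pvCandA new S F k)
termination_by new.countP (fun a => !F.contains a)
decreasing_by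
  have hx : (pvCandA new S F k).head h ∈ pvCandA new S F k := List.head_mem h
  have hx' := List.mem_filter.mp hx
  refine pvCountP_lt new _ _ ?_ ((pvCandA new S F k).head h) hx'.1 ?_ ?_
  · intro a _ ha
    simp only [Bool.not_eq_true'] at ha ⊢
    simp only [List.contains_append, Bool.or_eq_false_iff] at ha
    exact ha.1
  · simp only [Bool.and_eq_true] at hx'
    exact hx'.2.2
  · simp only [Bool.not_eq_true, List.contains_append]
    simp [hx]

def find_suspicious_activities (suspicious_activities : List (List Int)) (new_activities : List (List Int)) (k : Int) : List (List Int) :=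
  pvLoopA new_activities k suspicious_activities []

-- ===== PORT B =====
-- early-exit loop of B's _matches: returns true as soon as the counter reaches k
def pvMatchGo (k : Int) : List (Int × Int) → Int → Bool
  | [], _ => false
  | p :: l, c =>
    if p.1 = p.2 then
      (if k ≤ c + 1 then true else pvMatchGo k l (c + 1))
    else pvMatchGo k l c

def pvMatches (a s : List Int) (k : Int) : Bool :=
  if k ≤ 0 then true
  else if (((min a.length s.length : Nat) : Int) < k) then false
  else pvMatchGo k (a.zip s) 0

def pvCandB (new frontier : List (List Int)) (seen : PySem.Set (List Int)) (k : Int) : List (List Int) :=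
  new.filter (fun a =>
    !(PySem.Set.contains seen a) && frontier.any (fun s => pvMatches a s k))

def pvLoopB (new : List (List Int)) (k : Int) (frontier final : List (List Int))
    (seen : PySem.Set (List Int)) : List (List Int) :=
  if hf : frontier = [] then final
  else
    pvLoopB new k (pvCandB new frontier seen k) (final ++ pvCandB new frontier seen k)
      (PySem.Set.update seen (pvCandB new frontier seen k))
termination_by (new.countP (fun a => !(PySem.Set.contains seen a)), frontier.length)
decreasing_by
  by_cases hc : pvCandB new frontier seen k = []
  · apply Prod.Lex.right'
    · rw [hc, PySem.Set.update_nil]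
    · rw [hc]
      simpa using List.length_pos_iff.mpr hf
  · apply Prod.Lex.left
    have hx : (pvCandB new frontier seen k).head hc ∈ pvCandB new frontier seen k := List.head_mem hc
    have hx' := List.mem_filter.mp hx
    refine pvCountP_lt new _ _ ?_ ((pvCandB new frontier seen k).head hc) hx'.1 ?_ ?_
    · intro a _ ha
      simp only [Bool.not_eq_true', PySem.Set.contains_eq_listContains] at ha ⊢
      have : a ∉ PySem.Set.update seen (pvCandB new frontier seen k) := by simpa using ha
      rw [PySem.Set.mem_update] at this
      simpa using (not_or.mp this).1
    · simp only [Bool.and_eq_true] at hx'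
      exact hx'.2.1
    · simp only [Bool.not_eq_true', PySem.Set.contains_eq_listContains]
      simp [(PySem.Set.mem_update seen _ _).mpr (Or.inr hx)]

def find_suspicious_activities_alt (suspicious_activities : List (List Int)) (new_activities : List (List Int)) (k : Int) : List (List Int) :=
  pvLoopB new_activities k suspicious_activities [] PySem.Set.empty

-- ===== PRECONDITION & SPEC =====
def Spec_find_suspicious_activities (suspicious_activities : List (List Int)) (new_activities : List (List Int)) (k : Int) (out : List (List Int)) : Prop := out = find_suspicious_activities_alt suspicious_activities new_activities k
instance (suspicious_activities : List (List Int)) (new_activities : List (List Int)) (k : Int) (out : List (List Int)) : Decidable (Spec_find_suspicious_activities suspicious_activities new_activities k out) := by unfold Spec_find_suspicious_activities; infer_instance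

-- ===== CLAIM (what is proved, stated in full; the proofs are below) =====
def Claim_equal_find_suspicious_activities : Prop := ∀ (suspicious_activities : List (List Int)) (new_activities : List (List Int)) (k : Int), Dom_find_suspicious_activities suspicious_activities new_activities k → Spec_find_suspicious_activities suspicious_activities new_activities k (find_suspicious_activities suspicious_activities new_activities k)

-- ===== LEMMAS AND PROOFS =====
def pvMS (l : List (Int × Int)) : Int :=
  (l.map (fun p => if p.1 = p.2 then (1 : Int) else 0)).sum

theorem pvMS_nonneg (l : List (Int × Int)) : 0 ≤ pvMS l := by
  induction l with
  | nil => simp [pvMS]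
  | cons p l ih =>
    simp only [pvMS, List.map_cons, List.sum_cons] at ih ⊢
    split <;> omega

theorem pvMS_le_len (l : List (Int × Int)) : pvMS l ≤ (l.length : Int) := by
  induction l with
  | nil => simp [pvMS]
  | cons p l ih =>
    simp only [pvMS, List.map_cons, List.sum_cons, List.length_cons] at ih ⊢
    push_cast
    split <;> omega

theorem pvCount_eq_MS (a s : List Int) : pvCountMatching a s = pvMS (a.zip s) := by
  unfold pvCountMatching pvMS
  suffices h : ∀ (l : List (Int × Int)) (c : Int),
      l.foldl (fun c p => if p.1 = p.2 then c + 1 else c) c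
        = c + (l.map (fun p => if p.1 = p.2 then (1 : Int) else 0)).sum by
    simpa using h (a.zip s) 0
  intro l
  induction l with
  | nil => intro c; simp
  | cons p l ih =>
    intro c
    simp only [List.foldl_cons, List.map_cons, List.sum_cons, ih]
    split <;> ring

theorem pvMatchGo_spec (k : Int) :
    ∀ (l : List (Int × Int)) (c : Int), c < k →
      pvMatchGo k l c = decide (k ≤ c + pvMS l) := by
  intro l
  induction l with
  | nil =>
    intro c hc
    simp only [pvMatchGo, pvMS, List.map_nil, List.sum_nil]
    simp; omega
  | cons p l ih =>
    intro c hc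
    simp only [pvMatchGo]
    by_cases hp : p.1 = p.2
    · rw [if_pos hp]
      have hms : pvMS (p :: l) = 1 + pvMS l := by
        simp [pvMS, hp]
      rw [hms]
      by_cases hk : k ≤ c + 1
      · rw [if_pos hk]
        have h0 := pvMS_nonneg l
        have hle : k ≤ c + (1 + pvMS l) := by omega
        simp [hle]
      · rw [if_neg hk, ih (c + 1) (by omega), decide_eq_decide]
        omega
    · rw [if_neg hp, ih c hc]
      have hms : pvMS (p :: l) = pvMS l := by
        simp [pvMS, hp]
      rw [hms]

theorem pvMatches_eq (a s : List Int) (k : Int) :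
    pvMatches a s k = decide (k ≤ pvCountMatching a s) := by
  unfold pvMatches
  rw [pvCount_eq_MS]
  split_ifs with h1 h2
  · have := pvMS_nonneg (a.zip s)
    simp; omega
  · have h3 := pvMS_le_len (a.zip s)
    rw [List.length_zip] at h3
    simp; omega
  · rw [pvMatchGo_spec k (a.zip s) 0 (by omega), zero_add]

-- core invariant: A at suspicious list pre ++ frontier equals B at frontier,
-- provided nothing admissible still matches the older prefix `pre`
theorem pvLoop_eq (new : List (List Int)) (k : Int) :
    ∀ (n : Nat) (F pre frontier : List (List Int)) (seen : PySem.Set (List Int)),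
      new.countP (fun a => !F.contains a) = n →
      (∀ x, x ∈ seen ↔ x ∈ F) →
      (∀ a ∈ new, a ∉ F → ∀ s ∈ pre, ¬ (k ≤ pvCountMatching a s)) →
      pvLoopA new k (pre ++ frontier) F = pvLoopB new k frontier F seen := by
  intro n
  induction n using Nat.strong_induction_on with
  | _ n ih =>
  intro F pre frontier seen hn hseen hpre
  have hcand : pvCandA new (pre ++ frontier) F k = pvCandB new frontier seen k := by
    unfold pvCandA pvCandB
    apply List.filter_congr
    intro a ha
    by_cases hF : a ∈ F
    · simp [hF, (hseen a).mpr hF]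
    · have hanyPre : pre.any (fun s => decide (k ≤ pvCountMatching a s)) = false :=
        List.any_eq_false.mpr (fun s hs => by simpa using hpre a ha hF s hs)
      have hseenF : a ∉ seen := fun h => hF ((hseen a).mp h)
      simp [pvIsSuspicious, List.any_append, pvMatches_eq, hF, hseenF, hanyPre]
  by_cases hfr : frontier = []
  · subst hfr
    have hA : pvCandA new (pre ++ []) F k = [] := by
      rw [hcand]; unfold pvCandB; simp
    rw [pvLoopA, pvLoopB]
    simp only [List.append_nil] at hA ⊢
    simp [hA]
  · rw [pvLoopA, pvLoopB]
    simp only [hfr, dite_false, hcand]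
    by_cases hc : pvCandB new frontier seen k = []
    · rw [dif_pos hc, hc, pvLoopB]
      simp
    · rw [dif_neg hc]
      -- head of the candidate list leaves the admissible count
      have hxB : (pvCandB new frontier seen k).head hc ∈ pvCandB new frontier seen k :=
        List.head_mem hc
      have hxA : (pvCandB new frontier seen k).head hc ∈ pvCandA new (pre ++ frontier) F k := by
        rw [hcand]; exact hxB
      have hxA' := List.mem_filter.mp hxA
      have hlt : new.countP (fun a => !(F ++ pvCandB new frontier seen k).contains a) < n := by
        rw [← hn]
        refine pvCountP_lt new _ _ ?_ ((pvCandB new frontier seen k).head hc) hxA'.1 ?_ ?_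
        · intro a _ hna
          simp only [Bool.not_eq_true'] at hna ⊢
          simp only [List.contains_append, Bool.or_eq_false_iff] at hna
          exact hna.1
        · simp only [Bool.and_eq_true] at hxA'
          exact hxA'.2.2
        · simp only [Bool.not_eq_true', List.contains_append]
          simp [hxB]
      have hrec := ih _ hlt (F ++ pvCandB new frontier seen k) (pre ++ frontier)
        (pvCandB new frontier seen k) (PySem.Set.update seen (pvCandB new frontier seen k))
        rfl
        (by
          intro x
          rw [PySem.Set.mem_update, List.mem_append, hseen x])
        (by
          intro a ha haF s hs
          have haF' : a ∉ F := fun h => haF (List.mem_append.mpr (Or.inl h))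
          rcases List.mem_append.mp hs with hs | hs
          · exact hpre a ha haF' s hs
          · intro hk
            apply haF
            refine List.mem_append.mpr (Or.inr ?_)
            rw [← hcand]
            unfold pvCandA
            refine List.mem_filter.mpr ⟨ha, ?_⟩
            simp only [Bool.and_eq_true, Bool.not_eq_true']
            refine ⟨?_, by simpa [List.contains_iff_mem] using haF'⟩
            exact List.any_eq_true.mpr ⟨s, by simp [List.mem_append, hs], by simpa using hk⟩)
      exact hrec

-- ===== VERDICT (by name: the statement is the Claim_ definition above) =====
theorem find_suspicious_activities_spec : Claim_equal_find_suspicious_activities := by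
  intro S new k _
  unfold Spec_find_suspicious_activities find_suspicious_activities find_suspicious_activities_alt
  exact pvLoop_eq new k _ [] [] S PySem.Set.empty rfl (by simp [PySem.Set.empty]) (by simp)
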